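-- pv_equiv track=rewrite | github.com/uio-bmi/graph_peak_caller | graph_peak_caller/analysis/haplotype_finder.py | _prune_seqs
-- ===== SOURCE A (Python) =====
-- def _prune_seqs(ref, alts):
--     offset = 0
--     for cs in zip(*([ref]+alts)):
--         if all(c == cs[0] for c in cs):
--             offset += 1
--         else:
--             break
--     return ref[offset:], [alt[offset:] for alt in alts], offset
-- ===== SOURCE B (Python) =====
-- def _prune_seqs(ref, alts):
--     def lcp(a, b):
--         i = 0
--         n = min(len(a), len(b))
--         while i < n and a[i] == b[i]:
--             i += 1
--         return i
--     offset = min((lcp(ref, alt) for alt in alts), default=len(ref))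
--     return ref[offset:], [alt[offset:] for alt in alts], offset
-- ===== Notes on version B (the rewrite author's own statement) =====
-- stated objective: alternative
-- what changed: Replaces the column-wise simultaneous zip over all sequences with a row-wise pass: each alt's common-prefix length with ref is computed independently and the offset is the minimum of these lengths (default len(ref) when alts is empty).
import Mathlib
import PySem

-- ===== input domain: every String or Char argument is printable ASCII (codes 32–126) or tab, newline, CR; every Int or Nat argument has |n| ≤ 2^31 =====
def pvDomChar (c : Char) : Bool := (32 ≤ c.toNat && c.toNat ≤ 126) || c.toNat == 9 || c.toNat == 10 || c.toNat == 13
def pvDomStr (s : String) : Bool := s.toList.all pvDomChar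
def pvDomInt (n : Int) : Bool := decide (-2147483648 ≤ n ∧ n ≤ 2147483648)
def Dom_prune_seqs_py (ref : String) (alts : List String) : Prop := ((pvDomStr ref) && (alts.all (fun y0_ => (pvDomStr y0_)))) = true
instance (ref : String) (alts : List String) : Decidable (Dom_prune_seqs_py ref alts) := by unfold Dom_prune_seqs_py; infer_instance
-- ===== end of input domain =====

-- B replaces A's column-wise zip over all sequences by per-alt prefix lengths combined with min (alternative decomposition, same cost).


-- ===== PORT A =====
-- zip(*([ref]+alts)): the list of columns, stopping at the shortest sequence
def pvACols : List Char → List (List Char) → List (List Char)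
  | [], _ => []
  | c :: r, ts =>
      if ts.all (fun t => !t.isEmpty) then
        (c :: ts.map (fun t => t.headD c)) :: pvACols r (ts.map List.tail)
      else []

-- the for-loop: offset += 1 while all(c == cs[0] for c in cs), else break
def pvAOff : List (List Char) → Nat → Nat
  | [], off => off
  | cs :: rest, off =>
      if cs.all (fun c => c == cs.headD ' ') then pvAOff rest (off + 1) else off

def prune_seqs_py (ref : String) (alts : List String) : String × List String × Int :=
  let off : Int := (pvAOff (pvACols ref.toList (alts.map String.toList)) 0 : Nat)
  (String.ofList (PySem.List.slice ref.toList (some off) none),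
   alts.map (fun alt => String.ofList (PySem.List.slice alt.toList (some off) none)),
   off)

-- ===== PORT B =====
-- lcp(a, b): length of the common prefix of a and b
def pvLcp : List Char → List Char → Nat
  | a :: as_, b :: bs => if a == b then pvLcp as_ bs + 1 else 0
  | _, _ => 0

def prune_seqs_py_alt (ref : String) (alts : List String) : String × List String × Int :=
  let off : Int :=
    PySem.List.minD (alts.map (fun alt => ((pvLcp ref.toList alt.toList : Nat) : Int)))
      (fun x => x) ((ref.toList.length : Nat) : Int)
  (String.ofList (PySem.List.slice ref.toList (some off) none),
   alts.map (fun alt => String.ofList (PySem.List.slice alt.toList (some off) none)),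
   off)

-- ===== PRECONDITION & SPEC =====
def Spec_prune_seqs_py (ref : String) (alts : List String) (out : String × List String × Int) : Prop := out = prune_seqs_py_alt ref alts
instance (ref : String) (alts : List String) (out : String × List String × Int) : Decidable (Spec_prune_seqs_py ref alts out) := by unfold Spec_prune_seqs_py; infer_instance

-- ===== CLAIM (what is proved, stated in full; the proofs are below) =====
def Claim_equal_prune_seqs_py : Prop := ∀ (ref : String) (alts : List String), Dom_prune_seqs_py ref alts → Spec_prune_seqs_py ref alts (prune_seqs_py ref alts)

-- ===== LEMMAS AND PROOFS =====
-- min of a nonempty list (head as init), with default d on []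
def pvMinl (l : List Nat) (d : Nat) : Nat :=
  match l with
  | [] => d
  | x :: t => t.foldl min x

theorem pvAOff_shift (l : List (List Char)) (n : Nat) : pvAOff l n = n + pvAOff l 0 := by
  induction l generalizing n with
  | nil => simp [pvAOff]
  | cons cs rest ih =>
      simp only [pvAOff]
      split
      · rw [ih (n+1), ih 1]; omega
      · omega

theorem foldl_min_le_init (l : List Nat) (x : Nat) : l.foldl min x ≤ x := by
  induction l generalizing x with
  | nil => simp
  | cons a t ih => exact le_trans (ih (min x a)) (Nat.min_le_left _ _)

theorem foldl_min_le_mem {l : List Nat} {y : Nat} (h : y ∈ l) (x : Nat) : l.foldl min x ≤ y := by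
  induction l generalizing x with
  | nil => cases h
  | cons a t ih =>
      rcases List.mem_cons.mp h with rfl | hy
      · exact le_trans (foldl_min_le_init t (min x y)) (Nat.min_le_right _ _)
      · exact ih hy _

theorem pvMinl_le_mem {l : List Nat} {y : Nat} (h : y ∈ l) (d : Nat) : pvMinl l d ≤ y := by
  cases l with
  | nil => cases h
  | cons a t =>
      rcases List.mem_cons.mp h with rfl | hy
      · exact foldl_min_le_init t y
      · exact foldl_min_le_mem hy a

theorem foldl_min_succ (l : List Nat) (x : Nat) :
    (l.map (· + 1)).foldl min (x + 1) = l.foldl min x + 1 := by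
  induction l generalizing x with
  | nil => simp
  | cons a t ih => simpa [Nat.succ_min_succ] using ih (min x a)

theorem pvMinl_succ (l : List Nat) (d : Nat) :
    pvMinl (l.map (· + 1)) (d + 1) = pvMinl l d + 1 := by
  cases l with
  | nil => rfl
  | cons a t => simpa [pvMinl] using foldl_min_succ t a

theorem pvLcp_nil_left (t : List Char) : pvLcp [] t = 0 := by
  cases t <;> rfl

-- the key invariant: A's column loop computes the min of the pairwise prefix lengths
theorem off_eq (r : List Char) (ts : List (List Char)) :
    pvAOff (pvACols r ts) 0 = pvMinl (ts.map (pvLcp r)) r.length := by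
  induction r generalizing ts with
  | nil =>
      simp only [pvACols, pvAOff, List.length_nil]
      cases ts with
      | nil => rfl
      | cons t rest =>
          have h0 : pvMinl ((t :: rest).map (pvLcp [])) 0 ≤ 0 :=
            pvMinl_le_mem (by simp [pvLcp_nil_left t]) 0
          omega
  | cons c r' ih =>
      simp only [pvACols]
      by_cases hne : (ts.all (fun t => !t.isEmpty)) = true
      · rw [if_pos hne]
        simp only [pvAOff]
        by_cases hall : ((c :: ts.map (fun t => t.headD c)).all
            (fun x => x == (c :: ts.map (fun t => t.headD c)).headD ' ')) = true
        · -- every column entry equals c: recurse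
          rw [if_pos hall, pvAOff_shift, ih]
          have hmap : ts.map (pvLcp (c :: r')) =
              ((ts.map List.tail).map (pvLcp r')).map (· + 1) := by
            rw [List.map_map, List.map_map]
            apply List.map_congr_left
            intro t ht
            have h1 : (!t.isEmpty) = true := by
              have := List.all_eq_true.mp hne t ht; simpa using this
            cases t with
            | nil => simp at h1
            | cons h t' =>
                have hmem : h ∈ c :: ts.map (fun t => t.headD c) :=
                  List.mem_cons_of_mem _ (List.mem_map.mpr ⟨h :: t', ht, rfl⟩)
                have h2 := List.all_eq_true.mp hall h hmem
                have : h = c := by simpa using h2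
                subst this
                simp [pvLcp, List.tail]
          rw [hmap, List.length_cons, pvMinl_succ]
          omega
        · -- some column entry differs from c: both sides are 0
          rw [if_neg hall]
          -- find a t ∈ ts whose head differs from c
          have : ∃ t ∈ ts, ¬ (t.headD c == c) = true := by
            by_contra hno
            push Not at hno
            apply hall
            rw [List.all_eq_true]
            rintro x hx
            rcases List.mem_cons.mp hx with rfl | hx'
            · simp
            · rcases List.mem_map.mp hx' with ⟨t, ht, rfl⟩
              simpa using hno t ht
          rcases this with ⟨t, ht, hh⟩
          have h1 : (!t.isEmpty) = true := by
            have := List.all_eq_true.mp hne t ht; simpa using this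
          cases t with
          | nil => simp at h1
          | cons h t' =>
              have hne' : (h == c) = false := by
                simpa [List.headD] using hh
              have hzero : pvLcp (c :: r') (h :: t') = 0 := by
                have : (c == h) = false := by
                  simp only [beq_eq_false_iff_ne] at hne' ⊢
                  exact fun he => hne' he.symm
                simp [pvLcp, this]
              have hle : pvMinl (ts.map (pvLcp (c :: r'))) (c :: r').length ≤ 0 := by
                have : (0 : Nat) ∈ ts.map (pvLcp (c :: r')) := by
                  rw [← hzero]; exact List.mem_map_of_mem ht
                exact pvMinl_le_mem this _
              omega
      · -- some sequence exhausted: columns end here, both sides are 0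
        rw [if_neg hne]
        simp only [pvAOff]
        have : ∃ t ∈ ts, t = [] := by
          by_contra hno
          push Not at hno
          apply hne
          rw [List.all_eq_true]
          intro t ht
          have := hno t ht
          cases t with
          | nil => exact absurd rfl this
          | cons a b => simp
        rcases this with ⟨t, ht, rfl⟩
        have hle : pvMinl (ts.map (pvLcp (c :: r'))) (c :: r').length ≤ 0 := by
          have : (0 : Nat) ∈ ts.map (pvLcp (c :: r')) := by
            have : pvLcp (c :: r') [] = 0 := rfl
            rw [← this]; exact List.mem_map_of_mem ht
          exact pvMinl_le_mem this _
        omega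

theorem foldl_min_cast (l : List Nat) (x : Nat) :
    (l.map (fun n => ((n : Nat) : Int))).foldl min ((x : Nat) : Int) = ((l.foldl min x : Nat) : Int) := by
  induction l generalizing x with
  | nil => simp
  | cons a t ih => simpa [Nat.cast_min] using ih (min x a)

theorem minD_cast (l : List Nat) (d : Nat) :
    PySem.List.minD (l.map (fun n => ((n : Nat) : Int))) (fun x => x) ((d : Nat) : Int)
      = ((pvMinl l d : Nat) : Int) := by
  cases l with
  | nil => simp [PySem.List.minD, PySem.List.min?, pvMinl]
  | cons a t =>
      simp only [List.map_cons, PySem.List.minD, PySem.List.min?_id_cons, Option.getD_some, pvMinl]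
      exact foldl_min_cast t a

-- ===== VERDICT (by name: the statement is the Claim_ definition above) =====
theorem prune_seqs_py_spec : Claim_equal_prune_seqs_py := by
  intro ref alts _
  unfold Spec_prune_seqs_py prune_seqs_py prune_seqs_py_alt
  have hoff :
      ((pvAOff (pvACols ref.toList (alts.map String.toList)) 0 : Nat) : Int)
        = PySem.List.minD (alts.map (fun alt => ((pvLcp ref.toList alt.toList : Nat) : Int)))
            (fun x => x) ((ref.toList.length : Nat) : Int) := by
    have := off_eq ref.toList (alts.map String.toList)
    rw [this]
    have hmap : alts.map (fun alt => ((pvLcp ref.toList alt.toList : Nat) : Int))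
        = ((alts.map String.toList).map (pvLcp ref.toList)).map (fun n => ((n : Nat) : Int)) := by
      simp [List.map_map]
    rw [hmap, minD_cast]
  rw [hoff]
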